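-- pv_equiv track=rewrite | github.com/MaverickTushar007/quantsignal-api | app/domain/portfolio/xray.py | _infer_sector
-- ===== SOURCE A (Python) =====
-- def _infer_sector(symbol: str) -> str:
--     """Best-effort sector inference from symbol name."""
--     s = symbol.upper()
--     if any(x in s for x in ["BANK", "HDFC", "ICICI", "KOTAK", "AXIS", "SBI", "BAJFIN"]):
--         return "Financials"
--     if any(x in s for x in ["TCS", "INFY", "WIPRO", "HCLT", "TECH"]):
--         return "IT"
--     if any(x in s for x in ["RELIANCE", "ONGC", "BPCL", "IOC"]):
--         return "Energy"
--     if any(x in s for x in ["SUNPHARMA", "CIPLA", "DRREDDY", "DIVIS"]):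
--         return "Pharma"
--     if any(x in s for x in ["BTC", "ETH", "SOL", "BNB", "XRP"]):
--         return "Crypto"
--     if any(x in s for x in ["AAPL", "MSFT", "GOOGL", "NVDA", "META", "AMZN"]):
--         return "US Tech"
--     if any(x in s for x in ["GC=F", "SI=F", "GOLD"]):
--         return "Commodities"
--     return "Other"
-- ===== SOURCE B (Python) =====
-- _KEYWORD_RANK = {
--     "BANK": 0, "HDFC": 0, "ICICI": 0, "KOTAK": 0, "AXIS": 0, "SBI": 0, "BAJFIN": 0,
--     "TCS": 1, "INFY": 1, "WIPRO": 1, "HCLT": 1, "TECH": 1,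
--     "RELIANCE": 2, "ONGC": 2, "BPCL": 2, "IOC": 2,
--     "SUNPHARMA": 3, "CIPLA": 3, "DRREDDY": 3, "DIVIS": 3,
--     "BTC": 4, "ETH": 4, "SOL": 4, "BNB": 4, "XRP": 4,
--     "AAPL": 5, "MSFT": 5, "GOOGL": 5, "NVDA": 5, "META": 5, "AMZN": 5,
--     "GC=F": 6, "SI=F": 6, "GOLD": 6,
-- }
-- _SECTORS = ["Financials", "IT", "Energy", "Pharma", "Crypto", "US Tech", "Commodities", "Other"]
--
-- def _infer_sector(symbol: str) -> str:
--     """Best-effort sector inference from symbol name."""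
--     s = symbol.upper()
--     best = min((rank for kw, rank in _KEYWORD_RANK.items() if kw in s),
--                default=len(_SECTORS) - 1)
--     return _SECTORS[best]
-- ===== Notes on version B (the rewrite author's own statement) =====
-- stated objective: alternative
-- what changed: The seven-branch first-match if/any chain is replaced by a flat keyword-to-priority-rank map: B collects every matching keyword, takes the minimum rank (no short-circuit control flow), and indexes a sector-name table with it.
import Mathlib
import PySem

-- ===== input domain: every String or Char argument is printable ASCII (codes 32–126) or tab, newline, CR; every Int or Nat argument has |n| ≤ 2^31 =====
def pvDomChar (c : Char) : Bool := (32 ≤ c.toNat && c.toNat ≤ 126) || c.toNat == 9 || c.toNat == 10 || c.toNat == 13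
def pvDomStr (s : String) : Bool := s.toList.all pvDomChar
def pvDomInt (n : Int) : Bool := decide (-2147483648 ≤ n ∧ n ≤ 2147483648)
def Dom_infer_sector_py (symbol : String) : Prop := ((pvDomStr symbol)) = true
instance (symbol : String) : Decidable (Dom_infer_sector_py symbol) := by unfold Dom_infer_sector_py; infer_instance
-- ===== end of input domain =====

-- B replaces A's first-match if/any chain by a flat keyword→priority-rank map: it takes the
-- minimum rank over ALL matching keywords and indexes a sector-name table (alternative, same cost).

-- ===== PORT A =====
def infer_sector_py (symbol : String) : String :=
  let s := PySem.Str.upper symbol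
  if ["BANK", "HDFC", "ICICI", "KOTAK", "AXIS", "SBI", "BAJFIN"].any (fun x => PySem.Str.isIn x s) then "Financials"
  else if ["TCS", "INFY", "WIPRO", "HCLT", "TECH"].any (fun x => PySem.Str.isIn x s) then "IT"
  else if ["RELIANCE", "ONGC", "BPCL", "IOC"].any (fun x => PySem.Str.isIn x s) then "Energy"
  else if ["SUNPHARMA", "CIPLA", "DRREDDY", "DIVIS"].any (fun x => PySem.Str.isIn x s) then "Pharma"
  else if ["BTC", "ETH", "SOL", "BNB", "XRP"].any (fun x => PySem.Str.isIn x s) then "Crypto"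
  else if ["AAPL", "MSFT", "GOOGL", "NVDA", "META", "AMZN"].any (fun x => PySem.Str.isIn x s) then "US Tech"
  else if ["GC=F", "SI=F", "GOLD"].any (fun x => PySem.Str.isIn x s) then "Commodities"
  else "Other"

-- ===== PORT B =====
-- flat keyword → rank association list, insertion order of Source B's dict (no duplicate keys)
def kwRank : List (String × Nat) :=
  [("BANK", 0), ("HDFC", 0), ("ICICI", 0), ("KOTAK", 0), ("AXIS", 0), ("SBI", 0), ("BAJFIN", 0),
   ("TCS", 1), ("INFY", 1), ("WIPRO", 1), ("HCLT", 1), ("TECH", 1),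
   ("RELIANCE", 2), ("ONGC", 2), ("BPCL", 2), ("IOC", 2),
   ("SUNPHARMA", 3), ("CIPLA", 3), ("DRREDDY", 3), ("DIVIS", 3),
   ("BTC", 4), ("ETH", 4), ("SOL", 4), ("BNB", 4), ("XRP", 4),
   ("AAPL", 5), ("MSFT", 5), ("GOOGL", 5), ("NVDA", 5), ("META", 5), ("AMZN", 5),
   ("GC=F", 6), ("SI=F", 6), ("GOLD", 6)]

def sectorNames : List String := ["Financials", "IT", "Energy", "Pharma", "Crypto", "US Tech", "Commodities", "Other"]

-- one fold step of Python's min over the filtered generator (min(…, default=7) = fold of min from 7,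
-- exact here since every rank ≤ 6)
def rankStep (s : String) (acc : Nat) (p : String × Nat) : Nat :=
  if PySem.Str.isIn p.1 s then min acc p.2 else acc

def infer_sector_py_alt (symbol : String) : String :=
  let s := PySem.Str.upper symbol
  let best := kwRank.foldl (rankStep s) (sectorNames.length - 1)
  sectorNames.getD best "Other"   -- _SECTORS[best]; best ≤ 7 < 8 always, so plain indexing is exact

-- ===== PRECONDITION & SPEC =====
def Spec_infer_sector_py (symbol : String) (out : String) : Prop := out = infer_sector_py_alt symbol
instance (symbol : String) (out : String) : Decidable (Spec_infer_sector_py symbol out) := by unfold Spec_infer_sector_py; infer_instance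

-- ===== CLAIM (what is proved, stated in full; the proofs are below) =====
def Claim_equal_infer_sector_py : Prop := ∀ (symbol : String), Dom_infer_sector_py symbol → Spec_infer_sector_py symbol (infer_sector_py symbol)

-- ===== LEMMAS AND PROOFS =====

-- folding rankStep over a block of keywords that all carry the same rank r, followed by rest,
-- equals absorbing 'min acc r' once iff some keyword of the block matches
lemma fold_const_rank (s : String) (r : Nat) (kws : List String) (rest : List (String × Nat)) (acc : Nat) :
    (kws.map (fun kw => (kw, r)) ++ rest).foldl (rankStep s) acc
      = rest.foldl (rankStep s) (if kws.any (fun kw => PySem.Str.isIn kw s) then min acc r else acc) := by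
  induction kws generalizing acc with
  | nil => simp
  | cons kw t ih =>
      simp only [List.map_cons, List.cons_append, List.foldl_cons, List.any_cons]
      rw [ih]
      congr 1
      unfold rankStep
      dsimp only
      rcases Bool.eq_false_or_eq_true (PySem.Str.isIn kw s) with h | h <;>
        rcases Bool.eq_false_or_eq_true (t.any fun kw => PySem.Str.isIn kw s) with h2 | h2 <;>
          simp only [h, h2, Bool.or_false, Bool.or_true,
            reduceIte] <;>
          first | rfl | omega

set_option maxHeartbeats 2000000 in
-- ===== VERDICT (by name: the statement is the Claim_ definition above) =====
theorem infer_sector_py_spec : Claim_equal_infer_sector_py := by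
  intro symbol _
  unfold Spec_infer_sector_py infer_sector_py infer_sector_py_alt
  set s := PySem.Str.upper symbol with hs
  have hk : kwRank
      = (["BANK", "HDFC", "ICICI", "KOTAK", "AXIS", "SBI", "BAJFIN"].map (fun kw => (kw, 0)))
        ++ (["TCS", "INFY", "WIPRO", "HCLT", "TECH"].map (fun kw => (kw, 1)))
        ++ (["RELIANCE", "ONGC", "BPCL", "IOC"].map (fun kw => (kw, 2)))
        ++ (["SUNPHARMA", "CIPLA", "DRREDDY", "DIVIS"].map (fun kw => (kw, 3)))
        ++ (["BTC", "ETH", "SOL", "BNB", "XRP"].map (fun kw => (kw, 4)))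
        ++ (["AAPL", "MSFT", "GOOGL", "NVDA", "META", "AMZN"].map (fun kw => (kw, 5)))
        ++ (["GC=F", "SI=F", "GOLD"].map (fun kw => (kw, 6))) := by rfl
  rw [hk]
  simp only [List.append_assoc]
  rw [fold_const_rank, fold_const_rank, fold_const_rank, fold_const_rank, fold_const_rank,
      fold_const_rank]
  have hlast : ∀ acc : Nat,
      ((["GC=F", "SI=F", "GOLD"].map (fun kw => (kw, 6))).foldl (rankStep s) acc)
        = if ["GC=F", "SI=F", "GOLD"].any (fun kw => PySem.Str.isIn kw s) then min acc 6 else acc := by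
    intro acc
    have := fold_const_rank s 6 ["GC=F", "SI=F", "GOLD"] [] acc
    simpa using this
  rw [hlast]
  generalize (["BANK", "HDFC", "ICICI", "KOTAK", "AXIS", "SBI", "BAJFIN"] : List String).any (fun kw => PySem.Str.isIn kw s) = b1
  generalize (["TCS", "INFY", "WIPRO", "HCLT", "TECH"] : List String).any (fun kw => PySem.Str.isIn kw s) = b2
  generalize (["RELIANCE", "ONGC", "BPCL", "IOC"] : List String).any (fun kw => PySem.Str.isIn kw s) = b3
  generalize (["SUNPHARMA", "CIPLA", "DRREDDY", "DIVIS"] : List String).any (fun kw => PySem.Str.isIn kw s) = b4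
  generalize (["BTC", "ETH", "SOL", "BNB", "XRP"] : List String).any (fun kw => PySem.Str.isIn kw s) = b5
  generalize (["AAPL", "MSFT", "GOOGL", "NVDA", "META", "AMZN"] : List String).any (fun kw => PySem.Str.isIn kw s) = b6
  generalize (["GC=F", "SI=F", "GOLD"] : List String).any (fun kw => PySem.Str.isIn kw s) = b7
  revert b1 b2 b3 b4 b5 b6 b7
  decide
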